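-- pv_equiv track=rewrite | github.com/FennexFox/packetflow_foundry | builders/packet-workflow/retained-skills/gh-fix-pr-writeup/scripts/pr_writeup_tools.py | select_representative_files
-- ===== SOURCE A (Python) =====
-- from typing import Iterable
--
-- GROUP_SAMPLE_LIMIT = 16
--
-- def sample_parent(path: str) -> str:
--     normalized = path.replace("\\", "/")
--     return normalized.rsplit("/", 1)[0] if "/" in normalized else "."
--
-- def select_representative_files(paths: Iterable[str], limit: int = GROUP_SAMPLE_LIMIT) -> list[str]:
--     ordered_paths: list[str] = []
--     for path in paths:
--         normalized = path.replace("\\", "/")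
--         if normalized not in ordered_paths:
--             ordered_paths.append(normalized)
--
--     if len(ordered_paths) <= limit:
--         return ordered_paths
--
--     bucket_order: list[str] = []
--     buckets: dict[str, list[str]] = {}
--     for path in ordered_paths:
--         parent = sample_parent(path)
--         if parent not in buckets:
--             buckets[parent] = []
--             bucket_order.append(parent)
--         buckets[parent].append(path)
--
--     selected: list[str] = []
--     while len(selected) < limit:
--         progressed = False
--         for parent in bucket_order:
--             bucket = buckets[parent]
--             if not bucket:
--                 continue
--             selected.append(bucket.pop(0))
--             progressed = True
--             if len(selected) >= limit:
--                 break
--         if not progressed: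
--             break
--
--     original_index = {path: index for index, path in enumerate(ordered_paths)}
--     return sorted(selected, key=original_index.__getitem__)
-- ===== SOURCE B (Python) =====
-- GROUP_SAMPLE_LIMIT = 16
--
-- def sample_parent(path: str) -> str:
--     normalized = path.replace("\\", "/")
--     return normalized.rsplit("/", 1)[0] if "/" in normalized else "."
--
-- def select_representative_files(paths, limit=GROUP_SAMPLE_LIMIT):
--     ordered = list(dict.fromkeys(path.replace("\\", "/") for path in paths))
--     if len(ordered) <= limit:
--         return ordered
--
--     # Stamp every path with (round within its bucket, bucket position, original index).
--     bucket_pos = {}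
--     counts = {}
--     records = []
--     for index, path in enumerate(ordered):
--         parent = sample_parent(path)
--         if parent not in bucket_pos:
--             bucket_pos[parent] = len(bucket_pos)
--         rank = counts.get(parent, 0)
--         counts[parent] = rank + 1
--         records.append((rank, bucket_pos[parent], index, path))
--
--     # Round-robin selection == the `limit` smallest (rank, bucket position) keys.
--     top = sorted(records, key=lambda r: (r[0], r[1]))[:max(limit, 0)]
--     top.sort(key=lambda r: r[2])
--     return [r[3] for r in top]
-- ===== Notes on version B (the rewrite author's own statement) =====
-- stated objective: faster
-- what changed: A's destructive round-robin while-loop (repeatedly popping the head of each parent-directory bucket until the limit is reached, with an O(n) list-membership dedup) is replaced by a dict-based order-preserving dedup plus one pass stamping every path with a (round-within-bucket, bucket-position) key, selecting the limit smallest keys by one sort and re-sorting the picks by original index.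
import Mathlib
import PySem

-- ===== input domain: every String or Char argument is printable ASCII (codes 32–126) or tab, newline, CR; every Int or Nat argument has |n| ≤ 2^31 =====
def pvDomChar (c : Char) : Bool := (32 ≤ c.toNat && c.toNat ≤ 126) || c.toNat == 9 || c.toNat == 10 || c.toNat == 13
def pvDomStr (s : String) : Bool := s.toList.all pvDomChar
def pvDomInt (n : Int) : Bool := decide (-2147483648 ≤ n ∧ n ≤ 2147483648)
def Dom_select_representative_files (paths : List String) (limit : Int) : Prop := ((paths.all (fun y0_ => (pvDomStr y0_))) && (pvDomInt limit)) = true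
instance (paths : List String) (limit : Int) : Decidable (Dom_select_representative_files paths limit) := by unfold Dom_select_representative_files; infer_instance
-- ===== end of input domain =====

-- B replaces A's destructive round-robin while/pop(0) loop by stamping each path with a
-- (round-within-bucket, bucket-position) sort key and keeping the `limit` smallest keys
-- (objective: alternative decomposition of the same selection).


-- ===== PORT A =====
-- helper shared by both Pythons (same-module helper `sample_parent`)
def sample_parent (path : String) : String :=
  let normalized := PySem.Str.replace path "\\" "/"
  if PySem.Str.isIn "/" normalized then
    -- normalized.rsplit("/", 1)[0] with "/" present = everything before the LAST "/"
    -- (exact hand-port: rfind gives the index of that last "/")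
    PySem.Str.slice normalized none (some (PySem.Str.rfind normalized "/"))
  else "."

-- the inner `for parent in bucket_order` loop; `bucket.pop(0)` is written back with insert
-- (overwrite keeps position).  The `break` when len(selected) >= limit returns immediately;
-- the outer while-loop then stops anyway since its condition fails.
def pvA_innerPass (limit : Int) : List String → PySem.Dict String (List String) → List String → Bool →
    PySem.Dict String (List String) × List String × Bool
  | [], bk, sel, prog => (bk, sel, prog)
  | parent :: rest, bk, sel, prog =>
    match bk.getD parent [] with
    | [] => pvA_innerPass limit rest bk sel prog
    | x :: xs =>
      let bk' := bk.insert parent xs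
      let sel' := sel ++ [x]
      if limit ≤ (sel'.length : Int) then (bk', sel', true)
      else pvA_innerPass limit rest bk' sel' true

-- the `while len(selected) < limit` loop; fuel limit.toNat + 1 bounds the number of passes
-- (every pass that continues grows `selected` by at least one, and len(selected) < limit holds)
def pvA_while (limit : Int) (bucket_order : List String) :
    Nat → PySem.Dict String (List String) → List String → List String
  | 0, _, sel => sel
  | fuel + 1, bk, sel =>
    if limit ≤ (sel.length : Int) then sel
    else
      match pvA_innerPass limit bucket_order bk sel false with
      | (bk', sel', prog) => if prog then pvA_while limit bucket_order fuel bk' sel' else sel'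

def select_representative_files (paths : List String) (limit : Int) : List String :=
  let ordered := paths.foldl (fun acc path =>
      let normalized := PySem.Str.replace path "\\" "/"
      if acc.contains normalized then acc else acc ++ [normalized]) []
  if (ordered.length : Int) ≤ limit then ordered
  else
    let st := ordered.foldl (fun (st : List String × PySem.Dict String (List String)) path =>
        let parent := sample_parent path
        let st' := if st.2.contains parent then st else (st.1 ++ [parent], st.2.insert parent [])
        (st'.1, st'.2.modify parent [] (fun b => b ++ [path]))) ([], PySem.Dict.empty)
    let selected := pvA_while limit st.1 (limit.toNat + 1) st.2 []
    -- original_index = {path: index ...}; __getitem__ never raises here (selected ⊆ ordered)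
    let original_index := (PySem.List.enumerate ordered).foldl
        (fun d ip => d.insert ip.2 ip.1) (PySem.Dict.empty : PySem.Dict String Int)
    PySem.List.sorted selected (fun p => original_index.getD p 0)

-- ===== PORT B =====
def select_representative_files_alt (paths : List String) (limit : Int) : List String :=
  let ordered := PySem.List.dedup (paths.map (fun path => PySem.Str.replace path "\\" "/"))
  if (ordered.length : Int) ≤ limit then ordered
  else
    -- one pass stamping each path with (rank within its bucket, bucket position, index, path)
    let st := (PySem.List.enumerate ordered).foldl
      (fun (st : PySem.Dict String Int × PySem.Dict String Int × List (Int × Int × Int × String)) ip =>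
        let parent := sample_parent ip.2
        let bp := if st.1.contains parent then st.1 else st.1.insert parent (st.1.size : Int)
        let rank := st.2.1.getD parent 0
        (bp, st.2.1.insert parent (rank + 1), st.2.2 ++ [(rank, bp.getD parent 0, ip.1, ip.2)]))
      (PySem.Dict.empty, PySem.Dict.empty, [])
    let top := PySem.List.slice (PySem.List.sorted2 st.2.2 (fun r => r.1) (fun r => r.2.1))
        none (some (max limit 0))
    (PySem.List.sorted top (fun r => r.2.2.1)).map (fun r => r.2.2.2)

-- ===== PRECONDITION & SPEC =====
def Spec_select_representative_files (paths : List String) (limit : Int) (out : List String) : Prop := out = select_representative_files_alt paths limit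
instance (paths : List String) (limit : Int) (out : List String) : Decidable (Spec_select_representative_files paths limit out) := by unfold Spec_select_representative_files; infer_instance

-- ===== CLAIM (what is proved, stated in full; the proofs are below) =====
def Claim_equal_select_representative_files : Prop := ∀ (paths : List String) (limit : Int), Dom_select_representative_files paths limit → Spec_select_representative_files paths limit (select_representative_files paths limit)

-- ===== LEMMAS AND PROOFS =====

-- canonical vocabulary: buckets, bucket order, round-robin sequence, final answer
def pvBucket (L : List String) (b : String) : List String :=
  L.filter (fun p => sample_parent p == b)

def pvBO (L : List String) : List String := PySem.List.dedup (L.map sample_parent)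

def pvRow (L : List String) (p : Nat) : List String :=
  (pvBO L).filterMap (fun b => (pvBucket L b)[p]?)

def pvRRFrom (L : List String) (k : Nat) : List String :=
  ((List.range L.length).map (fun j => pvRow L (k + j))).flatten

def pvSel (L : List String) (limit : Int) : List String := (pvRRFrom L 0).take limit.toNat

def pvFinal (L : List String) (limit : Int) : List String :=
  L.filter (fun s => decide (s ∈ pvSel L limit))

def pvRec (L : List String) (s : String) : Int × Int × Int × String :=
  (((pvBucket L (sample_parent s)).idxOf s : Int),
   ((pvBO L).idxOf (sample_parent s) : Int),
   (L.idxOf s : Int), s)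

-- ---- generic list facts ----
lemma pv_pairwise_idxOf (l : List String) (h : l.Nodup) :
    l.Pairwise (fun a b => l.idxOf a < l.idxOf b) := by
  rw [List.pairwise_iff_getElem]
  intro i j hi hj hij
  rw [List.Nodup.idxOf_getElem h i hi, List.Nodup.idxOf_getElem h j hj]
  exact hij

lemma pv_idxOf_filter (l : List String) (q : String → Bool) (s : String)
    (hnd : l.Nodup) (hs : s ∈ l) (hq : q s = true) :
    (l.filter q).idxOf s = (l.take (l.idxOf s)).countP q := by
  induction l with
  | nil => cases hs
  | cons x tl ih =>
    rcases List.nodup_cons.mp hnd with ⟨hx, hnd'⟩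
    by_cases hxs : x = s
    · subst hxs
      simp [hq]
    · have hs' : s ∈ tl := by
        rcases hs with _ | h
        · exact absurd rfl hxs
        · assumption
      have hbeq : (x == s) = false := beq_eq_false_iff_ne.mpr hxs
      have hidx : List.idxOf s (x :: tl) = List.idxOf s tl + 1 := by
        simp [List.idxOf_cons, hbeq]
      rw [hidx, List.take_succ_cons, List.countP_cons]
      by_cases hqx : q x
      · rw [List.filter_cons_of_pos hqx]
        have h2 : List.idxOf s (x :: List.filter q tl) = List.idxOf s (List.filter q tl) + 1 := by
          simp [List.idxOf_cons, hbeq]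
        rw [h2, ih hnd' hs', hqx]
        simp
      · rw [List.filter_cons_of_neg hqx, ih hnd' hs']
        simp [hqx]

lemma pv_dedup_append (xs : List String) (x : String) :
    PySem.List.dedup (xs ++ [x]) = PySem.Set.add (PySem.List.dedup xs) x := by
  rw [PySem.List.dedup_eq_ofList, PySem.List.dedup_eq_ofList, PySem.Set.ofList_eq_foldl,
    PySem.Set.ofList_eq_foldl, List.foldl_append]
  rfl

lemma pv_foldl_add_exists (zs : List String) (s : PySem.Set String) :
    ∃ t, List.foldl PySem.Set.add s zs = s ++ t := by
  induction zs generalizing s with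
  | nil => exact ⟨[], by simp⟩
  | cons z zs ih =>
    simp only [List.foldl_cons]
    rcases ih (PySem.Set.add s z) with ⟨t, ht⟩
    by_cases hz : z ∈ s
    · exact ⟨t, by rw [ht]; simp [PySem.Set.add, hz]⟩
    · refine ⟨z :: t, ?_⟩
      rw [ht]
      simp [PySem.Set.add, hz]

lemma pv_idxOf_dedup_prefix (xs zs : List String) (b : String) (hb : b ∈ PySem.List.dedup xs) :
    (PySem.List.dedup (xs ++ zs)).idxOf b = (PySem.List.dedup xs).idxOf b := by
  have h1 : PySem.List.dedup (xs ++ zs) = List.foldl PySem.Set.add (PySem.List.dedup xs) zs := by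
    rw [PySem.List.dedup_eq_ofList, PySem.List.dedup_eq_ofList, PySem.Set.ofList_eq_foldl,
      PySem.Set.ofList_eq_foldl, List.foldl_append]
  rcases pv_foldl_add_exists zs (PySem.List.dedup xs) with ⟨t, ht⟩
  rw [h1, ht, List.idxOf_append, if_pos hb]

-- ---- facts about the canonical vocabulary ----
lemma pv_mem_bucket (L : List String) (b : String) (s : String) (hs : s ∈ pvBucket L b) :
    s ∈ L ∧ sample_parent s = b := by
  rcases List.mem_filter.mp hs with ⟨h1, h2⟩
  exact ⟨h1, by simpa using h2⟩

lemma pv_row_mem (L : List String) (p : Nat) (s : String) (hnd : L.Nodup) (hs : s ∈ pvRow L p) :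
    s ∈ L ∧ (pvBucket L (sample_parent s)).idxOf s = p := by
  rcases List.mem_filterMap.mp hs with ⟨b, hb, hsome⟩
  rcases List.getElem?_eq_some_iff.mp hsome with ⟨hlt, heq⟩
  have hmem : s ∈ pvBucket L b := heq ▸ List.getElem_mem hlt
  rcases pv_mem_bucket L b s hmem with ⟨hsL, hpar⟩
  subst hpar
  refine ⟨hsL, ?_⟩
  have hbnd : (pvBucket L (sample_parent s)).Nodup := List.Sublist.nodup List.filter_sublist hnd
  have h3 := List.Nodup.idxOf_getElem hbnd p hlt
  rw [heq] at h3
  exact h3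

lemma pv_bucket_get (L : List String) (hnd : L.Nodup) (b t : String) (p : Nat)
    (h : (pvBucket L b)[p]? = some t) :
    sample_parent t = b ∧ ((pvBucket L (sample_parent t)).idxOf t : Int) = (p : Int) := by
  rcases List.getElem?_eq_some_iff.mp h with ⟨hlt, heq⟩
  have hmem : t ∈ pvBucket L b := heq ▸ List.getElem_mem hlt
  rcases pv_mem_bucket L b t hmem with ⟨_, hpar⟩
  refine ⟨hpar, ?_⟩
  have hbnd : (pvBucket L b).Nodup := List.Sublist.nodup List.filter_sublist hnd
  have h3 := List.Nodup.idxOf_getElem hbnd p hlt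
  rw [heq] at h3
  rw [hpar, h3]

lemma pv_row_eq_nil (L : List String) (p : Nat) (hp : L.length ≤ p) : pvRow L p = [] := by
  unfold pvRow
  rw [List.filterMap_eq_nil_iff]
  intro b _
  exact List.getElem?_eq_none (le_trans (List.length_filter_le _ _) hp)

lemma pv_rrFrom_cons (L : List String) (k : Nat) :
    pvRRFrom L k = pvRow L k ++ pvRRFrom L (k + 1) := by
  unfold pvRRFrom
  rcases hn : L.length with _ | m
  · have hL : L = [] := List.length_eq_zero_iff.mp hn
    subst hL
    simp [pvRow, pvBO, PySem.List.dedup_eq_ofList, PySem.Set.ofList_eq_foldl]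
  · conv_lhs => rw [List.range_succ_eq_map]
    conv_rhs => rw [List.range_succ]
    simp only [List.map_cons, List.flatten_cons, List.map_map, List.map_append,
      List.flatten_append, List.map_nil, List.flatten_nil, List.append_nil]
    rw [pv_row_eq_nil L (k + 1 + m) (by omega)]
    simp only [List.append_nil, Nat.add_zero]
    congr 1
    congr 1
    apply List.map_congr_left
    intro j _
    simp only [Function.comp_apply]
    congr 1
    omega

lemma pv_row_empty_rest (L : List String) (k : Nat) (h : pvRow L k = []) : pvRRFrom L k = [] := by
  have hlen : ∀ b ∈ pvBO L, (pvBucket L b).length ≤ k := by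
    intro b hb
    by_contra hk
    have := List.filterMap_eq_nil_iff.mp h b hb
    rw [List.getElem?_eq_none_iff] at this
    omega
  unfold pvRRFrom
  rw [List.flatten_eq_nil_iff]
  intro l hl
  rcases List.mem_map.mp hl with ⟨j, _, rfl⟩
  unfold pvRow
  rw [List.filterMap_eq_nil_iff]
  intro b hb
  exact List.getElem?_eq_none (le_trans (hlen b hb) (by omega))

lemma pv_partition_perm (L : List String) (bs : List String) (hnd : bs.Nodup)
    (hcov : ∀ s ∈ L, sample_parent s ∈ bs) :
    ((bs.map (fun b => pvBucket L b)).flatten).Perm L := by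
  induction bs generalizing L with
  | nil =>
    have hL : L = [] := by
      rcases L with _ | ⟨s, L⟩
      · rfl
      · exact absurd (hcov s (by simp)) (by simp)
    simp [hL]
  | cons b bs ih =>
    rcases List.nodup_cons.mp hnd with ⟨hb, hnd'⟩
    simp only [List.map_cons, List.flatten_cons]
    have hperm := List.filter_append_perm (fun s => sample_parent s == b) L
    have hmap : bs.map (fun c => pvBucket L c) =
        bs.map (fun c => pvBucket (L.filter (fun s => !(sample_parent s == b))) c) := by
      apply List.map_congr_left
      intro c hc
      have hcb : c ≠ b := fun h => hb (h ▸ hc)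
      unfold pvBucket
      rw [List.filter_filter]
      apply List.filter_congr
      intro t _
      by_cases htc : sample_parent t == c
      · have htc' : sample_parent t = c := by simpa using htc
        have htb : (sample_parent t == b) = false := by
          simp [htc']; exact hcb
        simp [htc, htb]
      · simp [htc]
    have hcov' : ∀ t ∈ L.filter (fun s => !(sample_parent s == b)), sample_parent t ∈ bs := by
      intro t ht
      rcases List.mem_filter.mp ht with ⟨htL, htb⟩
      have := hcov t htL
      rcases List.mem_cons.mp this with h | h
      · exfalso; simp [h] at htb
      · exact h
    rw [hmap]
    exact ((ih _ hnd' hcov').append_left _).trans hperm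

lemma pv_rr_perm (L : List String) : (pvRRFrom L 0).Perm L := by
  have hrowflat : ∀ p : Nat, pvRow L p =
      ((pvBO L).map (fun b => ((pvBucket L b)[p]?).toList)).flatten := by
    intro p
    unfold pvRow
    induction pvBO L with
    | nil => simp
    | cons b bs ih => cases h : (pvBucket L b)[p]? <;> simp [h, ih]
  have aux1 : ∀ (bs : List String) (f g : String → List String),
      ((bs.map (fun b => f b ++ g b)).flatten).Perm ((bs.map f).flatten ++ (bs.map g).flatten) := by
    intro bs f g
    induction bs with
    | nil => simp
    | cons b bs ih =>
      simp only [List.map_cons, List.flatten_cons]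
      rw [List.append_assoc, List.append_assoc]
      exact ((ih.append_left _).trans (List.perm_append_comm_assoc _ _ _)).append_left _
  have aux2 : ∀ N : Nat, (((List.range N).map (fun j => pvRow L j)).flatten).Perm
      (((pvBO L).map (fun b => (pvBucket L b).take N)).flatten) := by
    intro N
    induction N with
    | zero => simp
    | succ N ih =>
      rw [List.range_succ]
      simp only [List.map_append, List.flatten_append, List.map_cons, List.map_nil,
        List.flatten_cons, List.flatten_nil, List.append_nil]
      have htake : (pvBO L).map (fun b => (pvBucket L b).take (N + 1)) =
          (pvBO L).map (fun b => (pvBucket L b).take N ++ ((pvBucket L b)[N]?).toList) := by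
        apply List.map_congr_left
        intro b _
        exact List.take_add_one
      rw [htake]
      refine List.Perm.trans ?_ (aux1 _ _ _).symm
      exact ih.append (by rw [hrowflat N])
  have hfull : ((pvBO L).map (fun b => (pvBucket L b).take L.length)).flatten =
      ((pvBO L).map (fun b => pvBucket L b)).flatten := by
    congr 1
    apply List.map_congr_left
    intro b _
    exact List.take_of_length_le (List.length_filter_le _ _)
  have hcov : ∀ s ∈ L, sample_parent s ∈ pvBO L := by
    intro s hs
    rw [pvBO, PySem.List.mem_dedup]
    exact List.mem_map_of_mem hs
  have h0 : pvRRFrom L 0 = ((List.range L.length).map (fun j => pvRow L j)).flatten := by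
    unfold pvRRFrom
    simp
  rw [h0]
  exact ((aux2 L.length).trans (hfull ▸ pv_partition_perm L (pvBO L)
    (PySem.List.nodup_dedup _) hcov))

-- ---- A side: the dedup loop ----
lemma pvA_dedup (paths : List String) :
    paths.foldl (fun acc path =>
      let normalized := PySem.Str.replace path "\\" "/"
      if acc.contains normalized then acc else acc ++ [normalized]) [] =
    PySem.List.dedup (paths.map (fun path => PySem.Str.replace path "\\" "/")) := by
  rw [PySem.List.dedup_eq_ofList, PySem.Set.ofList_eq_foldl, List.foldl_map]
  rfl

-- ---- A side: the bucketing loop ----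
lemma pv_set_add_eq (l : List String) (x : String) :
    PySem.Set.add l x = if l.contains x then l else l ++ [x] := rfl

lemma pvA_bucketFold (rest : List String) : ∀ (P : List String)
    (st : List String × PySem.Dict String (List String)),
    st.1 = PySem.List.dedup (P.map sample_parent) →
    (∀ b, st.2.contains b = (PySem.List.dedup (P.map sample_parent)).contains b) →
    (∀ b ∈ st.1, st.2.getD b [] = P.filter (fun p => sample_parent p == b)) →
    let st' := rest.foldl (fun (st : List String × PySem.Dict String (List String)) path =>
        let parent := sample_parent path
        let st' := if st.2.contains parent then st else (st.1 ++ [parent], st.2.insert parent [])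
        (st'.1, st'.2.modify parent [] (fun b => b ++ [path]))) st
    st'.1 = PySem.List.dedup ((P ++ rest).map sample_parent) ∧
    (∀ b, st'.2.contains b = (PySem.List.dedup ((P ++ rest).map sample_parent)).contains b) ∧
    (∀ b ∈ st'.1, st'.2.getD b [] = (P ++ rest).filter (fun p => sample_parent p == b)) := by
  induction rest with
  | nil =>
    intro P st h1 h2 h3
    refine ⟨?_, ?_, ?_⟩ <;> simp only [List.foldl_nil, List.append_nil]
    · exact h1
    · exact h2
    · exact h3
  | cons path rest ih =>
    intro P st h1 h2 h3
    have happ : P ++ path :: rest = (P ++ [path]) ++ rest := by simp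
    rw [happ, List.foldl_cons]
    apply ih (P ++ [path])
    all_goals dsimp only
    · -- the new bucket_order is the dedup of the extended prefix
      rw [List.map_append, List.map_cons, List.map_nil, pv_dedup_append, pv_set_add_eq, h2]
      by_cases hc : (PySem.List.dedup (P.map sample_parent)).contains (sample_parent path)
      · rw [if_pos hc, if_pos hc]
        exact h1
      · rw [if_neg hc, if_neg hc]
        dsimp only
        rw [h1]
    · -- dict membership agrees with the extended dedup list
      intro b
      rw [PySem.Dict.contains_modify, List.map_append, List.map_cons, List.map_nil,
        pv_dedup_append, pv_set_add_eq]
      by_cases hc : st.2.contains (sample_parent path)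
      · rw [if_pos hc]
        rw [h2] at hc
        rw [if_pos hc, h2]
        by_cases hb : b = sample_parent path
        · subst hb
          simp only [beq_self_eq_true, Bool.true_or]
          exact hc.symm
        · have hbe : (b == sample_parent path) = false := beq_eq_false_iff_ne.mpr hb
          rw [hbe]
          simp
      · rw [if_neg hc]
        rw [h2] at hc
        rw [if_neg hc]
        dsimp only
        rw [PySem.Dict.contains_insert, h2, List.contains_append, List.contains_cons,
          List.contains_nil]
        cases b == sample_parent path <;> simp
    · -- the stored buckets are the filters of the extended prefix
      intro b hbmem
      rw [List.filter_append]
      by_cases hb : b = sample_parent path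
      · subst hb
        rw [PySem.Dict.getD_modify_self]
        have hlast : [path].filter (fun p => sample_parent p == sample_parent path) = [path] := by
          simp
        rw [hlast]
        by_cases hc : st.2.contains (sample_parent path)
        · rw [if_pos hc]
          have hmem : sample_parent path ∈ st.1 := by
            rw [h1, ← List.contains_iff_mem, ← h2]
            exact hc
          rw [h3 _ hmem]
        · rw [if_neg hc]
          dsimp only
          rw [PySem.Dict.getD_insert_self]
          have hnil : P.filter (fun p => sample_parent p == sample_parent path) = [] := by
            rw [List.filter_eq_nil_iff]
            intro a ha hpar
            have heqp : sample_parent a = sample_parent path := by simpa using hpar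
            have hmm : sample_parent path ∈ PySem.List.dedup (P.map sample_parent) := by
              rw [PySem.List.mem_dedup]
              exact heqp ▸ List.mem_map_of_mem ha
            rw [h2] at hc
            exact hc (List.contains_iff_mem.mpr hmm)
          rw [hnil]
      · -- b ≠ parent: this bucket is untouched by the step
        have hne : (sample_parent path == b) = false :=
          beq_eq_false_iff_ne.mpr (fun h => hb h.symm)
        rw [PySem.Dict.getD_modify, if_neg hb]
        have hlast : [path].filter (fun p => sample_parent p == b) = [] := by
          simp [hne]
        rw [hlast, List.append_nil]
        by_cases hc : st.2.contains (sample_parent path)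
        · rw [if_pos hc] at hbmem ⊢
          exact h3 b hbmem
        · rw [if_neg hc] at hbmem ⊢
          dsimp only at hbmem ⊢
          rw [PySem.Dict.getD_insert_of_ne _ _ _ hb]
          have hbmem' : b ∈ st.1 := by
            rcases List.mem_append.mp hbmem with h | h
            · exact h
            · exact absurd (by simpa using h) hb
          exact h3 b hbmem'

-- ---- A side: inner pass ----
lemma pvA_inner (limit : Int) (lim : Nat) (hl : limit = (lim : Int)) (tl : String → List String) :
    ∀ (bos : List String) (bk : PySem.Dict String (List String)) (sel : List String) (prog : Bool),
    bos.Nodup →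
    (∀ b ∈ bos, bk.getD b [] = tl b) →
    sel.length < lim →
    (pvA_innerPass limit bos bk sel prog).2.1 =
        sel ++ (bos.filterMap (fun b => (tl b).head?)).take (lim - sel.length) ∧
    (pvA_innerPass limit bos bk sel prog).2.2 =
        (prog || !(bos.filterMap (fun b => (tl b).head?)).isEmpty) ∧
    (sel.length + (bos.filterMap (fun b => (tl b).head?)).length < lim →
      (∀ b ∈ bos, (pvA_innerPass limit bos bk sel prog).1.getD b [] = (tl b).tail) ∧
      (∀ b, b ∉ bos → (pvA_innerPass limit bos bk sel prog).1.getD b [] = bk.getD b [])) := by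
  intro bos
  induction bos with
  | nil =>
    intro bk sel prog hnd hbk hsel
    refine ⟨by simp [pvA_innerPass], by simp [pvA_innerPass], fun _ => ⟨by simp, ?_⟩⟩
    intro b _
    simp [pvA_innerPass]
  | cons parent rest ih =>
    intro bk sel prog hnd hbk hsel
    rcases List.nodup_cons.mp hnd with ⟨hp, hnd'⟩
    have hgd : bk.getD parent [] = tl parent := hbk parent (by simp)
    cases htl : tl parent with
    | nil =>
      have hstep : pvA_innerPass limit (parent :: rest) bk sel prog
          = pvA_innerPass limit rest bk sel prog := by
        rw [pvA_innerPass, hgd, htl]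
      have hbk' : ∀ b ∈ rest, bk.getD b [] = tl b := fun b hb => hbk b (by simp [hb])
      rcases ih bk sel prog hnd' hbk' hsel with ⟨ha, hb, hc⟩
      have hheads : (parent :: rest).filterMap (fun b => (tl b).head?)
          = rest.filterMap (fun b => (tl b).head?) := by
        rw [List.filterMap_cons, htl]
        rfl
      refine ⟨by rw [hstep, hheads, ha], by rw [hstep, hheads, hb], ?_⟩
      intro hlen
      rw [hheads] at hlen
      rcases hc hlen with ⟨hc1, hc2⟩
      refine ⟨?_, ?_⟩
      · intro b hbmem
        rcases List.mem_cons.mp hbmem with rfl | hbm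
        · rw [hstep, hc2 b hp, hgd, htl]
          rfl
        · rw [hstep]; exact hc1 b hbm
      · intro b hbmem
        rw [hstep]
        exact hc2 b (fun h => hbmem (by simp [h]))
    | cons x xs =>
      have hstep : pvA_innerPass limit (parent :: rest) bk sel prog
          = (if limit ≤ ((sel ++ [x]).length : Int) then (bk.insert parent xs, sel ++ [x], true)
             else pvA_innerPass limit rest (bk.insert parent xs) (sel ++ [x]) true) := by
        rw [pvA_innerPass, hgd, htl]
      have hheads : (parent :: rest).filterMap (fun b => (tl b).head?)
          = x :: rest.filterMap (fun b => (tl b).head?) := by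
        rw [List.filterMap_cons, htl]
        rfl
      by_cases hlc : limit ≤ ((sel ++ [x]).length : Int)
      · rw [if_pos hlc] at hstep
        have hlc' : lim ≤ sel.length + 1 := by
          rw [hl] at hlc
          simp only [List.length_append, List.length_cons, List.length_nil] at hlc
          exact_mod_cast hlc
        have hlim1 : lim = sel.length + 1 := by omega
        refine ⟨?_, ?_, ?_⟩
        · rw [hstep, hheads]
          have : lim - sel.length = 1 := by omega
          rw [this, List.take_succ_cons, List.take_zero]
        · rw [hstep, hheads]
          simp
        · intro hlen
          rw [hheads] at hlen
          simp only [List.length_cons] at hlen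
          omega
      · rw [if_neg hlc] at hstep
        have hsel' : (sel ++ [x]).length < lim := by
          rw [hl] at hlc
          simp only [not_le] at hlc
          exact_mod_cast hlc
        have hbk' : ∀ b ∈ rest, (bk.insert parent xs).getD b [] = tl b := by
          intro b hb
          rw [PySem.Dict.getD_insert_of_ne _ _ _ (by rintro rfl; exact hp hb)]
          exact hbk b (by simp [hb])
        rcases ih (bk.insert parent xs) (sel ++ [x]) true hnd' hbk' hsel' with ⟨ha, hb, hc⟩
        refine ⟨?_, ?_, ?_⟩
        · rw [hstep, ha, hheads, List.append_assoc]
          congr 1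
          have h1 : lim - sel.length = (lim - (sel ++ [x]).length) + 1 := by
            simp only [List.length_append, List.length_cons, List.length_nil]
            simp only [List.length_append, List.length_cons, List.length_nil] at hsel'
            omega
          rw [h1, List.take_succ_cons]
          rfl
        · rw [hstep, hb, hheads]
          simp
        · intro hlen
          rw [hheads] at hlen
          simp only [List.length_cons] at hlen
          have hlen' : (sel ++ [x]).length + (rest.filterMap (fun b => (tl b).head?)).length < lim := by
            simp only [List.length_append, List.length_cons, List.length_nil]
            omega
          rcases hc hlen' with ⟨hc1, hc2⟩
          refine ⟨?_, ?_⟩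
          · intro b hbmem
            rcases List.mem_cons.mp hbmem with rfl | hbm
            · rw [hstep, hc2 b hp, PySem.Dict.getD_insert_self, htl]
              rfl
            · rw [hstep]; exact hc1 b hbm
          · intro b hbmem
            rw [hstep, hc2 b (fun h => hbmem (by simp [h])),
              PySem.Dict.getD_insert_of_ne _ _ _ (fun h => hbmem (by simp [h]))]

-- ---- A side: while loop ----
lemma pvA_loop (limit : Int) (lim : Nat) (hl : limit = (lim : Int)) (L : List String) :
    ∀ (fuel k : Nat) (bk : PySem.Dict String (List String)) (sel : List String),
    (∀ b ∈ pvBO L, bk.getD b [] = (pvBucket L b).drop k) →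
    sel.length < lim →
    lim ≤ sel.length + fuel →
    pvA_while limit (pvBO L) fuel bk sel = sel ++ (pvRRFrom L k).take (lim - sel.length) := by
  intro fuel
  induction fuel with
  | zero =>
    intro k bk sel hbk hsel hfuel
    omega
  | succ fuel ih =>
    intro k bk sel hbk hsel hfuel
    have hnotle : ¬ (limit ≤ (sel.length : Int)) := by
      rw [hl]
      exact_mod_cast not_le.mpr hsel
    rw [pvA_while, if_neg hnotle]
    have hbo : (pvBO L).Nodup := PySem.List.nodup_dedup _
    have hbk' : ∀ b ∈ pvBO L, bk.getD b [] = (pvBucket L b).drop k := hbk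
    rcases pvA_inner limit lim hl (fun b => (pvBucket L b).drop k) (pvBO L) bk sel false
        hbo hbk' hsel with ⟨ha, hb, hc⟩
    have hheads : (pvBO L).filterMap (fun b => ((pvBucket L b).drop k).head?) = pvRow L k := by
      unfold pvRow
      apply List.filterMap_congr
      intro b _
      rw [List.head?_drop]
    rcases hres : pvA_innerPass limit (pvBO L) bk sel false with ⟨bk', sel', prog⟩
    rw [hres] at ha hb hc
    simp only at ha hb hc
    rw [hheads] at ha hb hc
    dsimp only
    by_cases hrow : pvRow L k = []
    · -- no progress: loop stops, and the rest of the round-robin sequence is empty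
      rw [hrow] at ha hb
      simp at ha hb
      rw [hb, if_neg (by simp), ha, pv_row_empty_rest L k hrow]
      simp
    · have hprog : prog = true := by
        rw [hb]
        simp [hrow]
      rw [hprog, if_pos rfl]
      by_cases hfull : sel.length + (pvRow L k).length < lim
      · -- full pass below the limit: recurse with every bucket popped once
        rcases hc hfull with ⟨hc1, _⟩
        have hbk'' : ∀ b ∈ pvBO L, bk'.getD b [] = (pvBucket L b).drop (k + 1) := by
          intro b hbm
          rw [hc1 b hbm, List.tail_drop]
        have hsel'' : sel'.length < lim := by
          rw [ha]
          simp only [List.length_append, List.length_take]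
          omega
        have hfuel'' : lim ≤ sel'.length + fuel := by
          rw [ha]
          simp only [List.length_append, List.length_take]
          have hrl : 0 < (pvRow L k).length := List.length_pos_iff.mpr hrow
          omega
        have htk : (pvRow L k).take (lim - sel.length) = pvRow L k :=
          List.take_of_length_le (by omega)
        rw [htk] at ha
        have hidx : lim - (sel ++ pvRow L k).length = lim - sel.length - (pvRow L k).length := by
          simp only [List.length_append]
          omega
        rw [ih (k + 1) bk' sel' hbk'' hsel'' hfuel'', ha, hidx, pv_rrFrom_cons L k,
          List.take_append, htk, List.append_assoc]
      · -- the limit is reached inside this pass; the loop then returns selected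
        have hlen' : sel'.length = lim := by
          rw [ha]
          simp only [List.length_append, List.length_take]
          omega
        have hstop : pvA_while limit (pvBO L) fuel bk' sel' = sel' := by
          cases fuel with
          | zero => rw [pvA_while]
          | succ fuel =>
            rw [pvA_while, if_pos (by rw [hl, hlen'])]
        rw [hstop, ha, pv_rrFrom_cons L k, List.take_append_of_le_length (by omega)]

-- ---- A side: original_index dictionary ----
lemma pv_oi_frame (f : String × Nat → Int) (ps : List (String × Nat)) :
    ∀ (d : PySem.Dict String Int) (s : String), s ∉ ps.map (fun p => p.1) →
    (ps.foldl (fun d p => d.insert p.1 (f p)) d).getD s 0 = d.getD s 0 := by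
  induction ps with
  | nil => intro d s _; rfl
  | cons p ps ih =>
    intro d s h
    simp only [List.map_cons, List.mem_cons, not_or] at h
    rw [List.foldl_cons, ih _ s h.2, PySem.Dict.getD_insert_of_ne _ _ _ h.1]

lemma pv_oi_gen (f : String × Nat → Int) (ps : List (String × Nat)) :
    ∀ (d : PySem.Dict String Int) (s : String) (i : Nat),
    (ps.map (fun p => p.1)).Nodup → (s, i) ∈ ps →
    (ps.foldl (fun d p => d.insert p.1 (f p)) d).getD s 0 = f (s, i) := by
  induction ps with
  | nil => intro d s i _ h; cases h
  | cons p ps ih =>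
    intro d s i hnd hmem
    rcases List.nodup_cons.mp hnd with ⟨hp, hnd'⟩
    rw [List.foldl_cons]
    rcases List.mem_cons.mp hmem with heq | hmem'
    · have hs1 : p.1 = s := by rw [← heq]
      have hnot : s ∉ ps.map (fun p => p.1) := hs1 ▸ hp
      rw [pv_oi_frame f ps (d.insert p.1 (f p)) s hnot, show p = (s, i) from heq.symm]
      exact PySem.Dict.getD_insert_self d s (f (s, i)) 0
    · have hs2 : s ∈ ps.map (fun p => p.1) := List.mem_map_of_mem (f := fun p => p.1) hmem'
      exact ih _ s i hnd' hmem'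

lemma pv_oi (L : List String) (hnd : L.Nodup) (s : String) (hs : s ∈ L) :
    ((PySem.List.enumerate L).foldl (fun d ip => d.insert ip.2 ip.1)
        (PySem.Dict.empty : PySem.Dict String Int)).getD s 0 = (L.idxOf s : Int) := by
  rw [PySem.List.enumerate_eq_zipIdx_map, List.foldl_map]
  have hlt : L.idxOf s < L.length := List.idxOf_lt_length_of_mem hs
  have hmem : (s, L.idxOf s) ∈ L.zipIdx := by
    have hel := List.getElem_mem (l := L.zipIdx) (by rw [List.length_zipIdx]; exact hlt)
    rw [List.getElem_zipIdx] at hel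
    simpa [List.getElem_idxOf hlt] using hel
  have hfst : L.zipIdx.map (fun p => p.1) = L := by
    simp
  have hnd2 : (L.zipIdx.map (fun p => p.1)).Nodup := by rw [hfst]; exact hnd
  have h := pv_oi_gen (fun p => ((0 : Int) + (p.2 : Int))) L.zipIdx
    PySem.Dict.empty s (L.idxOf s) hnd2 hmem
  exact h.trans (zero_add _)

-- ---- B side: the records loop ----
def pvEntry (P : List String) (si : String × Nat) : Int × Int × Int × String :=
  (((P.take si.2).countP (fun t => sample_parent t == sample_parent si.1) : Int),
   ((PySem.List.dedup ((P.take (si.2 + 1)).map sample_parent)).idxOf (sample_parent si.1) : Int),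
   (si.2 : Int), si.1)

lemma pvB_fold (rest : List String) : ∀ (P : List String)
    (st : PySem.Dict String Int × PySem.Dict String Int × List (Int × Int × Int × String)),
    (∀ b, st.1.contains b = (PySem.List.dedup (P.map sample_parent)).contains b) →
    (∀ b ∈ PySem.List.dedup (P.map sample_parent),
        st.1.getD b 0 = ((PySem.List.dedup (P.map sample_parent)).idxOf b : Int)) →
    st.1.size = (PySem.List.dedup (P.map sample_parent)).length →
    (∀ b, st.2.1.getD b 0 = (P.countP (fun t => sample_parent t == b) : Int)) →
    st.2.2 = (P.zipIdx.map (pvEntry P)) →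
    let st' := (rest.zipIdx P.length).foldl
      (fun (st : PySem.Dict String Int × PySem.Dict String Int × List (Int × Int × Int × String)) ip =>
        let parent := sample_parent ip.1
        let bp := if st.1.contains parent then st.1 else st.1.insert parent (st.1.size : Int)
        let rank := st.2.1.getD parent 0
        (bp, st.2.1.insert parent (rank + 1), st.2.2 ++ [(rank, bp.getD parent 0, (ip.2 : Int), ip.1)])) st
    (∀ b, st'.1.contains b = (PySem.List.dedup ((P ++ rest).map sample_parent)).contains b) ∧
    (∀ b ∈ PySem.List.dedup ((P ++ rest).map sample_parent),
        st'.1.getD b 0 = ((PySem.List.dedup ((P ++ rest).map sample_parent)).idxOf b : Int)) ∧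
    st'.1.size = (PySem.List.dedup ((P ++ rest).map sample_parent)).length ∧
    (∀ b, st'.2.1.getD b 0 = ((P ++ rest).countP (fun t => sample_parent t == b) : Int)) ∧
    st'.2.2 = ((P ++ rest).zipIdx.map (pvEntry (P ++ rest))) := by
  induction rest with
  | nil =>
    intro P st h1 h2 h3 h4 h5
    refine ⟨?_, ?_, ?_, ?_, ?_⟩ <;> simp only [List.zipIdx_nil, List.foldl_nil, List.append_nil]
    · exact h1
    · exact h2
    · exact h3
    · exact h4
    · simpa using h5
  | cons x rest ih =>
    intro P st h1 h2 h3 h4 h5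
    have happ : P ++ x :: rest = (P ++ [x]) ++ rest := by simp
    rw [happ, List.zipIdx_cons, List.foldl_cons]
    have hoff : rest.zipIdx (P.length + 1) = rest.zipIdx ((P ++ [x]).length) := by simp
    rw [hoff]
    have hnotm : st.1.contains (sample_parent x) = false →
        sample_parent x ∉ PySem.List.dedup (P.map sample_parent) := by
      intro hcf hm
      rw [h1 (sample_parent x)] at hcf
      exact absurd (List.contains_iff_mem.mpr hm) (by rw [hcf]; simp)
    refine ih (P ++ [x]) _ ?_ ?_ ?_ ?_ ?_
    all_goals try dsimp only
    · -- dict of bucket positions has the keys of the extended dedup list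
      intro b
      rw [List.map_append, List.map_cons, List.map_nil, pv_dedup_append, pv_set_add_eq]
      by_cases hcon : st.1.contains (sample_parent x) = true
      · rw [if_pos hcon]
        rw [h1] at hcon
        rw [if_pos hcon]
        exact h1 b
      · have hcf : st.1.contains (sample_parent x) = false := by simpa using hcon
        rw [if_neg hcon]
        rw [PySem.Dict.contains_insert]
        have hcfd : (PySem.List.dedup (P.map sample_parent)).contains (sample_parent x) = false := by
          rw [← h1]
          exact hcf
        rw [hcfd]
        simp only [Bool.false_eq_true, if_false]
        rw [h1 b, List.contains_append, List.contains_cons, List.contains_nil]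
        cases b == sample_parent x <;> simp
    · -- stored bucket positions are the indices in the extended dedup list
      intro b hbm
      rw [List.map_append, List.map_cons, List.map_nil, pv_dedup_append, pv_set_add_eq] at hbm ⊢
      by_cases hcon : st.1.contains (sample_parent x) = true
      · have hcd : (PySem.List.dedup (P.map sample_parent)).contains (sample_parent x) = true := by
          rw [← h1]; exact hcon
        rw [if_pos hcd] at hbm ⊢
        rw [if_pos hcon]
        exact h2 b hbm
      · have hcf : st.1.contains (sample_parent x) = false := by simpa using hcon
        have hcd : (PySem.List.dedup (P.map sample_parent)).contains (sample_parent x) = false := by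
          rw [← h1]; exact hcf
        have hnot := hnotm hcf
        rw [hcd] at hbm ⊢
        simp only [Bool.false_eq_true, if_false] at hbm ⊢
        rw [if_neg hcon]
        by_cases hb : b = sample_parent x
        · subst hb
          rw [PySem.Dict.getD_insert_self, h3, List.idxOf_append, if_neg hnot]
          simp
        · rw [PySem.Dict.getD_insert_of_ne _ _ _ hb]
          have hbm' : b ∈ PySem.List.dedup (P.map sample_parent) := by
            rcases List.mem_append.mp hbm with h | h
            · exact h
            · exact absurd (by simpa using h) hb
          rw [h2 b hbm', List.idxOf_append, if_pos hbm']
    · -- dict size is the length of the extended dedup list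
      rw [List.map_append, List.map_cons, List.map_nil, pv_dedup_append, pv_set_add_eq]
      by_cases hcon : st.1.contains (sample_parent x) = true
      · rw [if_pos hcon]
        rw [h1] at hcon
        rw [if_pos hcon]
        exact h3
      · have hcf : st.1.contains (sample_parent x) = false := by simpa using hcon
        have hcd : (PySem.List.dedup (P.map sample_parent)).contains (sample_parent x) = false := by
          rw [← h1]; exact hcf
        rw [if_neg hcon]
        rw [PySem.Dict.size_insert, hcf, if_neg (by simp), h3, hcd]
        simp only [Bool.false_eq_true, if_false, List.length_append, List.length_cons,
          List.length_nil]
    · -- the counters count parents in the extended prefix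
      intro b
      by_cases hb : b = sample_parent x
      · subst hb
        rw [PySem.Dict.getD_insert_self, h4, List.countP_append]
        have hone : List.countP (fun t => (sample_parent t == sample_parent x)) [x] = 1 := by
          simp
        rw [hone]
        push_cast
        ring
      · have hne : (sample_parent x == b) = false :=
          beq_eq_false_iff_ne.mpr (fun h => hb h.symm)
        rw [PySem.Dict.getD_insert_of_ne _ _ _ hb, h4 b, List.countP_append]
        have hzero : [x].countP (fun t => sample_parent t == b) = 0 := by
          simp [hne]
        rw [hzero]
        simp
    · -- the records list extends by the new stamped entry
      rw [h5, List.zipIdx_append, List.zipIdx_cons, List.zipIdx_nil, List.map_append]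
      congr 1
      · apply List.map_congr_left
        intro si hsi
        have hi : si.2 < P.length := by
          rcases si with ⟨a, i⟩
          rcases List.mem_zipIdx hsi with ⟨_, hlt, _⟩
          simpa using hlt
        unfold pvEntry
        rw [List.take_append_of_le_length (by omega), List.take_append_of_le_length (by omega)]
      · simp only [List.map_cons, List.map_nil, Nat.zero_add]
        unfold pvEntry
        have hf1 : st.2.1.getD (sample_parent x) 0 =
            (((P ++ [x]).take P.length).countP
              (fun t => sample_parent t == sample_parent x) : Int) := by
          rw [List.take_left, h4]
        have htake : (P ++ [x]).take (P.length + 1) = P ++ [x] :=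
          List.take_of_length_le (by simp)
        have hf2 : (if st.1.contains (sample_parent x) = true then st.1
              else st.1.insert (sample_parent x) (st.1.size : Int)).getD (sample_parent x) 0 =
            ((PySem.List.dedup (((P ++ [x]).take (P.length + 1)).map sample_parent)).idxOf
              (sample_parent x) : Int) := by
          rw [htake, List.map_append, List.map_cons, List.map_nil, pv_dedup_append, pv_set_add_eq]
          by_cases hcon : st.1.contains (sample_parent x) = true
          · have hcd : (PySem.List.dedup (P.map sample_parent)).contains (sample_parent x) = true := by
              rw [← h1]; exact hcon
            rw [if_pos hcon, if_pos hcd]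
            exact h2 _ (List.contains_iff_mem.mp hcd)
          · have hcf : st.1.contains (sample_parent x) = false := by simpa using hcon
            have hcd : (PySem.List.dedup (P.map sample_parent)).contains (sample_parent x) = false := by
              rw [← h1]; exact hcf
            rw [if_neg hcon, hcd]
            simp only [Bool.false_eq_true, if_false]
            rw [PySem.Dict.getD_insert_self, h3, List.idxOf_append, if_neg (hnotm hcf)]
            simp
        rw [← hf1, ← hf2]

lemma pvB_records (L : List String) (hnd : L.Nodup) :
    L.zipIdx.map (pvEntry L) = L.map (pvRec L) := by
  apply List.ext_getElem
  · simp
  intro i h1 h2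
  have hlen : i < L.length := by simpa using h2
  rw [List.getElem_map, List.getElem_map, List.getElem_zipIdx]
  unfold pvEntry pvRec
  dsimp only
  have hidx : L.idxOf L[i] = i := List.Nodup.idxOf_getElem hnd i hlen
  have hq : (fun p => sample_parent p == sample_parent L[i]) L[i] = true := by simp
  simp only [Prod.mk.injEq]
  refine ⟨?_, ?_, ?_, trivial⟩
  · have hf := pv_idxOf_filter L (fun p => sample_parent p == sample_parent L[i]) L[i] hnd
      (List.getElem_mem hlen) (by simp)
    rw [hidx] at hf
    have hbk : pvBucket L (sample_parent L[i]) =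
        L.filter (fun p => sample_parent p == sample_parent L[i]) := rfl
    rw [hbk, hf, Nat.zero_add]
  · have hsplit : pvBO L =
        PySem.List.dedup ((L.take (i + 1)).map sample_parent ++ (L.drop (i + 1)).map sample_parent) := by
      rw [← List.map_append, List.take_append_drop]
      rfl
    have hmm : sample_parent L[i] ∈ PySem.List.dedup ((L.take (i + 1)).map sample_parent) := by
      rw [PySem.List.mem_dedup]
      have hti : i < (L.take (i + 1)).length := by
        simp only [List.length_take]
        omega
      have hmt : L[i] ∈ L.take (i + 1) := by
        have hg := List.getElem_mem hti
        rwa [List.getElem_take] at hg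
      exact List.mem_map_of_mem hmt
    have hz : 0 + i + 1 = i + 1 := by omega
    have key : (PySem.List.dedup ((L.take (i + 1)).map sample_parent)).idxOf (sample_parent L[i])
        = (pvBO L).idxOf (sample_parent L[i]) := by
      conv_rhs => rw [hsplit]
      exact (pv_idxOf_dedup_prefix _ _ _ hmm).symm
    rw [hz, key]
  · simp [hidx]

-- ---- B side: sorted2 is sort by the lexicographic key ----
lemma pv_sorted2_lex {α : Type} (xs : List α) (k1 k2 : α → Int) :
    PySem.List.sorted2 xs k1 k2 = PySem.List.sorted xs (fun a => toLex (k1 a, k2 a)) := by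
  have hbef : (fun a b : α => (decide (k1 a < k1 b) ||
        (!decide (k1 b < k1 a) && decide (k2 a < k2 b))))
      = (fun a b : α => decide ((toLex (k1 a, k2 a)) < toLex (k1 b, k2 b))) := by
    funext a b
    rcases lt_trichotomy (k1 a) (k1 b) with h | h | h
    · simp [Prod.Lex.lt_iff, h, asymm h]
    · simp [Prod.Lex.lt_iff, h]
    · simp [Prod.Lex.lt_iff, asymm h, h, h.ne']
  show xs.foldl (fun acc x => PySem.List.insertBy
      (fun a b => (decide (k1 a < k1 b) || (!decide (k1 b < k1 a) && decide (k2 a < k2 b)))) x acc) [] =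
    xs.foldl (fun acc x => PySem.List.insertBy
      (fun a b => decide ((toLex (k1 a, k2 a)) < toLex (k1 b, k2 b))) x acc) []
  rw [hbef]

lemma pv_sorted_records (L : List String) (hnd : L.Nodup) :
    PySem.List.sorted2 (L.map (pvRec L)) (fun r => r.1) (fun r => r.2.1) =
    (pvRRFrom L 0).map (pvRec L) := by
  rw [pv_sorted2_lex]
  apply PySem.List.sorted_eq_of_perm_of_pairwise_lt
  · exact (pv_rr_perm L).map _
  · rw [List.pairwise_map]
    have hrr : pvRRFrom L 0 = ((List.range L.length).map (fun j => pvRow L j)).flatten := by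
      unfold pvRRFrom
      simp
    rw [hrr, List.pairwise_flatten]
    constructor
    · intro l hl
      rcases List.mem_map.mp hl with ⟨p, _, rfl⟩
      unfold pvRow
      rw [List.pairwise_filterMap]
      refine List.Pairwise.imp_of_mem ?_ (pv_pairwise_idxOf (pvBO L) (PySem.List.nodup_dedup _))
      intro b b' _ _ hlt t ht t' ht'
      rcases pv_bucket_get L hnd b t p ht with ⟨hpar, hrank⟩
      rcases pv_bucket_get L hnd b' t' p ht' with ⟨hpar', hrank'⟩
      unfold pvRec
      dsimp only
      rw [Prod.Lex.lt_iff]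
      simp only [ofLex_toLex]
      right
      constructor
      · rw [hrank, hrank']
      · rw [hpar, hpar']
        exact_mod_cast hlt
    · rw [List.pairwise_map]
      refine List.Pairwise.imp ?_ List.pairwise_lt_range
      intro p p' hpp a ha b hb
      rcases pv_row_mem L p a hnd ha with ⟨_, hr⟩
      rcases pv_row_mem L p' b hnd hb with ⟨_, hr'⟩
      unfold pvRec
      dsimp only
      rw [Prod.Lex.lt_iff]
      simp only [ofLex_toLex]
      left
      rw [hr, hr']
      exact_mod_cast hpp

-- ---- final sorting on both sides ----
lemma pv_sel_nodup (L : List String) (limit : Int) (hnd : L.Nodup) : (pvSel L limit).Nodup := by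
  exact List.Sublist.nodup (List.take_sublist _ _) ((pv_rr_perm L).nodup_iff.mpr hnd)

lemma pv_sel_perm_final (L : List String) (limit : Int) (hnd : L.Nodup) :
    (pvFinal L limit).Perm (pvSel L limit) := by
  unfold pvFinal
  rw [List.perm_ext_iff_of_nodup (List.Nodup.filter _ hnd) (pv_sel_nodup L limit hnd)]
  intro a
  simp only [List.mem_filter, decide_eq_true_eq]
  constructor
  · rintro ⟨_, h⟩
    exact h
  · intro h
    exact ⟨(pv_rr_perm L).mem_iff.mp (List.mem_of_mem_take h), h⟩

lemma pv_final_pairwise (L : List String) (limit : Int) (hnd : L.Nodup) :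
    (pvFinal L limit).Pairwise (fun a b => L.idxOf a < L.idxOf b) := by
  exact List.Pairwise.sublist List.filter_sublist (pv_pairwise_idxOf L hnd)

lemma pvA_final_sort (L : List String) (limit : Int) (hnd : L.Nodup) :
    PySem.List.sorted (pvSel L limit)
      (fun p => ((PySem.List.enumerate L).foldl (fun d ip => d.insert ip.2 ip.1)
        (PySem.Dict.empty : PySem.Dict String Int)).getD p 0) = pvFinal L limit := by
  apply PySem.List.sorted_eq_of_perm_of_pairwise_lt
  · exact pv_sel_perm_final L limit hnd
  · refine List.Pairwise.imp_of_mem ?_ (pv_final_pairwise L limit hnd)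
    intro a b ha hb hlt
    have haL : a ∈ L := List.mem_of_mem_filter ha
    have hbL : b ∈ L := List.mem_of_mem_filter hb
    rw [pv_oi L hnd a haL, pv_oi L hnd b hbL]
    exact_mod_cast hlt

lemma pvB_final_sort (L : List String) (limit : Int) (hnd : L.Nodup) :
    PySem.List.sorted ((pvSel L limit).map (pvRec L)) (fun r => r.2.2.1) =
    (pvFinal L limit).map (pvRec L) := by
  apply PySem.List.sorted_eq_of_perm_of_pairwise_lt
  · exact (pv_sel_perm_final L limit hnd).map _
  · rw [List.pairwise_map]
    refine List.Pairwise.imp_of_mem ?_ (pv_final_pairwise L limit hnd)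
    intro a b _ _ hlt
    unfold pvRec
    dsimp only
    exact_mod_cast hlt

-- ===== VERDICT (by name: the statement is the Claim_ definition above) =====
theorem select_representative_files_spec : Claim_equal_select_representative_files := by
  unfold Claim_equal_select_representative_files
  intro paths limit _
  unfold Spec_select_representative_files select_representative_files select_representative_files_alt
  rw [pvA_dedup paths]
  dsimp only
  by_cases hle : ((PySem.List.dedup (paths.map (fun path =>
      PySem.Str.replace path "\\" "/"))).length : Int) ≤ limit
  · rw [if_pos hle, if_pos hle]
  · rw [if_neg hle, if_neg hle]
    set L := PySem.List.dedup (paths.map (fun path => PySem.Str.replace path "\\" "/")) with hLdef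
    have hndL : L.Nodup := PySem.List.nodup_dedup _
    -- characterise A's bucketing fold
    have hbf := pvA_bucketFold L [] ([], PySem.Dict.empty) rfl
      (fun b => by rw [PySem.Dict.contains_empty]; rfl) (fun b hb => by cases hb)
    simp only [List.nil_append] at hbf
    obtain ⟨hst1, hst2, hst3⟩ := hbf
    have hst1' : (L.foldl (fun (st : List String × PySem.Dict String (List String)) path =>
        let parent := sample_parent path
        let st' := if st.2.contains parent then st else (st.1 ++ [parent], st.2.insert parent [])
        (st'.1, st'.2.modify parent [] (fun b => b ++ [path]))) ([], PySem.Dict.empty)).1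
        = pvBO L := hst1
    rw [hst1']
    -- characterise B's records fold
    have hB := pvB_fold L [] (PySem.Dict.empty, PySem.Dict.empty, [])
      (fun b => by rw [PySem.Dict.contains_empty]; rfl) (fun b hb => by cases hb) rfl
      (fun b => by rw [PySem.Dict.getD_empty]; rfl) rfl
    have hrecs := hB.2.2.2.2
    simp only [List.nil_append] at hrecs
    rw [pvB_records L hndL] at hrecs
    have hrec' : ((PySem.List.enumerate L).foldl
        (fun (st : PySem.Dict String Int × PySem.Dict String Int × List (Int × Int × Int × String)) ip =>
          let parent := sample_parent ip.2
          let bp := if st.1.contains parent then st.1 else st.1.insert parent (st.1.size : Int)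
          let rank := st.2.1.getD parent 0
          (bp, st.2.1.insert parent (rank + 1), st.2.2 ++ [(rank, bp.getD parent 0, ip.1, ip.2)]))
        (PySem.Dict.empty, PySem.Dict.empty, [])).2.2 = L.map (pvRec L) := by
      rw [PySem.List.enumerate_eq_zipIdx_map, List.foldl_map]
      simp only [zero_add]
      exact hrecs
    rw [hrec', pv_sorted_records L hndL,
      PySem.List.slice_to _ (le_max_right limit 0)]
    have hmx : (max limit 0).toNat = limit.toNat := by omega
    rw [hmx, ← List.map_take]
    have hselr : (pvRRFrom L 0).take limit.toNat = pvSel L limit := rfl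
    rw [hselr, pvB_final_sort L limit hndL, List.map_map]
    have hmapid : ((fun (r : Int × Int × Int × String) => r.2.2.2) ∘ pvRec L) = id :=
      funext fun s => rfl
    rw [hmapid, List.map_id]
    -- A side: the while loop produces exactly the first `limit` round-robin picks
    by_cases hpos : 0 < limit
    · have hl : limit = (limit.toNat : Int) := (Int.toNat_of_nonneg (by omega)).symm
      have hbk : ∀ b ∈ pvBO L, ((L.foldl (fun (st : List String × PySem.Dict String (List String)) path =>
          let parent := sample_parent path
          let st' := if st.2.contains parent then st else (st.1 ++ [parent], st.2.insert parent [])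
          (st'.1, st'.2.modify parent [] (fun b => b ++ [path]))) ([], PySem.Dict.empty)).2).getD b []
          = (pvBucket L b).drop 0 := by
        intro b hb
        rw [List.drop_zero]
        exact hst3 b (by rw [hst1']; exact hb)
      have hloop := pvA_loop limit limit.toNat hl L (limit.toNat + 1) 0 _ [] hbk
        (by simpa using hpos) (by simp)
      rw [hloop]
      simp only [List.length_nil, Nat.sub_zero, List.nil_append]
      rw [hselr, pvA_final_sort L limit hndL]
    · -- limit ≤ 0: the loop stops immediately and B keeps no records either
      have ht : limit.toNat = 0 := by omega
      have hwhile : pvA_while limit (pvBO L) (limit.toNat + 1)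
          ((L.foldl (fun (st : List String × PySem.Dict String (List String)) path =>
            let parent := sample_parent path
            let st' := if st.2.contains parent then st else (st.1 ++ [parent], st.2.insert parent [])
            (st'.1, st'.2.modify parent [] (fun b => b ++ [path]))) ([], PySem.Dict.empty)).2) [] = [] := by
        rw [ht, pvA_while, if_pos (by simp; omega)]
      rw [hwhile]
      have hsel0 : pvSel L limit = [] := by
        unfold pvSel
        rw [ht, List.take_zero]
      have hfin0 : pvFinal L limit = [] := by
        rw [← pvA_final_sort L limit hndL, hsel0]
        rfl
      rw [hfin0]
      rfl
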